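-- pv_equiv track=rewrite | github.com/BenZCryptoEngineer/twillioSms | tennis_miner/ingestion/mcp.py | tokenize_rally
-- ===== SOURCE A (Python) =====
-- def tokenize_rally(rally_str: str) -> list[str]:
--     """Split continuous MCP rally string into shot tokens.
--
--     Each shot starts with a letter (type) followed by digits/modifiers.
--     Example: "f1b3f2*" → ["f1", "b3", "f2*"]
--     """
--     if not rally_str or not isinstance(rally_str, str):
--         return []
--
--     tokens = []
--     current = ""
--     for ch in rally_str.strip():
--         if ch.isalpha() and current:
--             tokens.append(current)
--             current = ch
--         else:
--             current += ch
--     if current: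
--         tokens.append(current)
--     return tokens
-- ===== SOURCE B (Python) =====
-- def tokenize_rally(rally_str: str) -> list[str]:
--     """Split continuous MCP rally string into shot tokens.
--
--     Two-pointer decomposition: each token is the slice from its starting
--     letter up to the next letter boundary; no character accumulator.
--     """
--     if not rally_str or not isinstance(rally_str, str):
--         return []
--     s = rally_str.strip()
--     tokens = []
--     i, n = 0, len(s)
--     while i < n:
--         j = i + 1
--         while j < n and not s[j].isalpha():
--             j += 1
--         tokens.append(s[i:j])
--         i = j
--     return tokens
-- ===== Notes on version B (the rewrite author's own statement) =====
-- stated objective: alternative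
-- what changed: A scans char by char while growing an accumulator string that it flushes at each letter; B uses a two-pointer scan that finds the next letter boundary and slices off one whole token at a time, with no accumulator string.
import Mathlib
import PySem

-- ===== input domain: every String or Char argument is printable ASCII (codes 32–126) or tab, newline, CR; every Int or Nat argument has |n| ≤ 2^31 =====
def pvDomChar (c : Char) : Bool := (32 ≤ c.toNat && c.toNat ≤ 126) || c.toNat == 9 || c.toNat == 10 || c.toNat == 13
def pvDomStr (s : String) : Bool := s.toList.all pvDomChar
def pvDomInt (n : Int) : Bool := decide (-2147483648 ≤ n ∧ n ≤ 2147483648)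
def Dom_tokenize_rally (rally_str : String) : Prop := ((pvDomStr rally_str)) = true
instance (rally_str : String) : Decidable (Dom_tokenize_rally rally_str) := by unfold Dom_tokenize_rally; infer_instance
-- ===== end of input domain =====

-- B replaces A's char-by-char accumulator loop with a two-pointer scan that slices off one
-- whole token at each letter boundary (alternative decomposition, same cost).
-- isalpha on one character is exact as PySem.Chars.isalpha on the ASCII domain.

-- ===== PORT A =====
-- one step of A's for-loop over (tokens, current)
def stepA (st : List (List Char) × List Char) (ch : Char) : List (List Char) × List Char :=
  if PySem.Chars.isalpha ch && !st.2.isEmpty then (st.1 ++ [st.2], [ch])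
  else (st.1, st.2 ++ [ch])

def tokenize_rally (rally_str : String) : List String :=
  if rally_str = "" then []
  else
    let st := (PySem.Str.strip rally_str).toList.foldl stepA ([], [])
    let toks := if !st.2.isEmpty then st.1 ++ [st.2] else st.1
    toks.map String.ofList

-- ===== PORT B =====
-- the inner while loop: 'while j < n and not s[j].isalpha(): j += 1'
def innerJ (l : List Char) (j : Nat) : Nat :=
  if h : j < l.length then
    if !(PySem.Chars.isalpha l[j]) then innerJ l (j + 1) else j
  else j
termination_by l.length - j

-- needed by outerLoop's termination: the inner loop never moves j backwards
theorem le_innerJ (l : List Char) (j : Nat) : j ≤ innerJ l j := by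
  induction j using innerJ.induct l with
  | case1 j h hc ih => rw [innerJ]; simp only [h, dif_pos, hc, if_pos]; omega
  | case2 j h hc => rw [innerJ]; simp [h, hc]
  | case3 j h => rw [innerJ]; simp [h]

-- the outer while loop; s[i:j] with 0 ≤ i ≤ j is exactly (l.take j).drop i
def outerLoop (l : List Char) (i : Nat) : List (List Char) :=
  if _h : i < l.length then
    let j := innerJ l (i + 1)
    ((l.take j).drop i) :: outerLoop l j
  else []
termination_by l.length - i
decreasing_by have := le_innerJ l (i + 1); omega

def tokenize_rally_alt (rally_str : String) : List String :=
  if rally_str = "" then []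
  else ((outerLoop (PySem.Str.strip rally_str).toList 0).map String.ofList)

-- ===== PRECONDITION & SPEC =====
def Spec_tokenize_rally (rally_str : String) (out : List String) : Prop := out = tokenize_rally_alt rally_str
instance (rally_str : String) (out : List String) : Decidable (Spec_tokenize_rally rally_str out) := by unfold Spec_tokenize_rally; infer_instance

-- ===== CLAIM (what is proved, stated in full; the proofs are below) =====
def Claim_equal_tokenize_rally : Prop := ∀ (rally_str : String), Dom_tokenize_rally rally_str → Spec_tokenize_rally rally_str (tokenize_rally rally_str)

-- ===== LEMMAS AND PROOFS =====

-- proof-only middle form: B's token list by structural recursion on the char list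
def nonAlphaRun : List Char → Nat
  | [] => 0
  | c :: cs => if !(PySem.Chars.isalpha c) then 1 + nonAlphaRun cs else 0

def splitB : List Char → List (List Char)
  | [] => []
  | c :: cs =>
    let j := 1 + nonAlphaRun cs
    (c :: cs).take j :: splitB ((c :: cs).drop j)
termination_by cs => cs.length
decreasing_by simp [List.length_drop]

-- abstract form of A's result from a nonempty current
def groupsRec : List Char → List Char → List (List Char)
  | cur, [] => [cur]
  | cur, c :: cs =>
    if PySem.Chars.isalpha c then cur :: groupsRec [c] cs else groupsRec (cur ++ [c]) cs

def flushA (st : List (List Char) × List Char) : List (List Char) :=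
  if !st.2.isEmpty then st.1 ++ [st.2] else st.1

theorem foldA_eq_groups (cs : List Char) : ∀ (toks : List (List Char)) (cur : List Char),
    cur ≠ [] → flushA (cs.foldl stepA (toks, cur)) = toks ++ groupsRec cur cs := by
  induction cs with
  | nil =>
    intro toks cur h
    simp [flushA, groupsRec, h]
  | cons c cs ih =>
    intro toks cur h
    by_cases hc : PySem.Chars.isalpha c = true
    · have : stepA (toks, cur) c = (toks ++ [cur], [c]) := by
        simp [stepA, hc, h]
      simp only [List.foldl_cons, this, ih (toks ++ [cur]) [c] (by simp)]
      simp [groupsRec, hc]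
    · have : stepA (toks, cur) c = (toks, cur ++ [c]) := by
        simp [stepA, hc]
      simp only [List.foldl_cons, this, ih toks (cur ++ [c]) (by simp)]
      simp [groupsRec, hc]

theorem groups_eq_split (cs : List Char) : ∀ (cur : List Char),
    groupsRec cur cs = (cur ++ cs.take (nonAlphaRun cs)) :: splitB (cs.drop (nonAlphaRun cs)) := by
  induction cs with
  | nil => intro cur; simp [groupsRec, splitB, nonAlphaRun]
  | cons c cs ih =>
    intro cur
    by_cases hc : PySem.Chars.isalpha c = true
    · have hn : nonAlphaRun (c :: cs) = 0 := by simp [nonAlphaRun, hc]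
      rw [hn]
      simp only [List.take_zero, List.drop_zero, List.append_nil, groupsRec, hc, if_true]
      rw [ih [c]]
      simp [splitB, Nat.add_comm]
    · have hn : nonAlphaRun (c :: cs) = 1 + nonAlphaRun cs := by simp [nonAlphaRun, hc]
      rw [hn]
      simp only [groupsRec]
      rw [if_neg hc]
      rw [ih (cur ++ [c])]
      have ht : (c :: cs).take (1 + nonAlphaRun cs) = c :: cs.take (nonAlphaRun cs) := by
        rw [Nat.add_comm]; exact List.take_succ_cons
      have hd : (c :: cs).drop (1 + nonAlphaRun cs) = cs.drop (nonAlphaRun cs) := by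
        rw [Nat.add_comm]; exact List.drop_succ_cons
      rw [ht, hd]
      simp

theorem splitB_eq_groups (c : Char) (cs : List Char) : splitB (c :: cs) = groupsRec [c] cs := by
  rw [groups_eq_split cs [c]]
  simp [splitB, Nat.add_comm]

-- the inner index loop computes the length of the non-letter run after j
theorem innerJ_eq (l : List Char) (j : Nat) (hj : j ≤ l.length) :
    innerJ l j = j + nonAlphaRun (l.drop j) := by
  induction j using innerJ.induct l with
  | case1 j h hc ih =>
    rw [innerJ]
    simp only [h, dif_pos, hc, if_pos]
    rw [ih (by omega)]
    rw [List.drop_eq_getElem_cons h]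
    simp [nonAlphaRun, hc]
    omega
  | case2 j h hc =>
    rw [innerJ]
    simp only [h, dif_pos, hc]
    rw [List.drop_eq_getElem_cons h]
    simp_all [nonAlphaRun]
  | case3 j h =>
    have : j = l.length := by omega
    rw [innerJ]
    simp [this, nonAlphaRun]

-- the outer index loop is the structural split of the remaining suffix
theorem outerLoop_eq_splitB (l : List Char) (i : Nat) : outerLoop l i = splitB (l.drop i) := by
  induction i using outerLoop.induct l with
  | case1 i h j ih =>
    rw [outerLoop]
    simp only [h, dif_pos]
    have hj : innerJ l (i + 1) = (i + 1) + nonAlphaRun (l.drop (i + 1)) := innerJ_eq l (i + 1) (by omega)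
    have hcons : l.drop i = l[i] :: l.drop (i + 1) := List.drop_eq_getElem_cons h
    have ih' : outerLoop l (innerJ l (i + 1)) = splitB (l.drop (innerJ l (i + 1))) := ih
    rw [ih', hj, hcons]
    simp only [splitB]
    congr 1
    · rw [List.drop_take]
      have h2 : i + 1 + nonAlphaRun (l.drop (i + 1)) - i = 1 + nonAlphaRun (l.drop (i + 1)) := by omega
      rw [h2, hcons, Nat.add_comm, List.take_succ_cons]
    · congr 1
      rw [Nat.add_comm 1, List.drop_succ_cons, ← List.drop_drop]
  | case2 i h =>
    rw [outerLoop]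
    have : l.length ≤ i := by omega
    simp [h, List.drop_eq_nil_of_le this, splitB]

-- ===== VERDICT (by name: the statement is the Claim_ definition above) =====
theorem tokenize_rally_spec : Claim_equal_tokenize_rally := by
  intro s _
  unfold Spec_tokenize_rally tokenize_rally tokenize_rally_alt
  by_cases hs : s = ""
  · simp [hs]
  · simp only [if_neg hs]
    rw [outerLoop_eq_splitB, List.drop_zero]
    cases hl : (PySem.Str.strip s).toList with
    | nil => simp [splitB]
    | cons c cs =>
      have h1 : List.foldl stepA ([], []) (c :: cs) = List.foldl stepA ([], [c]) cs := by
        simp [List.foldl_cons, stepA]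
      have h2 := foldA_eq_groups cs [] [c] (by simp)
      simp only [flushA] at h2
      simp only [h1]
      rw [splitB_eq_groups, h2]
      simp
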